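-- pv_equiv track=rewrite | github.com/CrowdDynamicsLab/StyleInfusion | data_feature_extraction/data_feature_utils.py | get_verb_tense
-- ===== SOURCE A (Python) =====
-- from typing import List, Dict, Tuple
--
-- def get_verb_tense(tagged_texts: List[List[Tuple]]) -> List[Dict]:
--     '''
--     Gets the verb tenses (past, present, future) for each verb in list of sentences
--     TODO: consider spacy?
--
--     args:
--         tagged_texts: POS tagged sentences. Each tuple represents (word, tag)
--     returns:
--         a list of dictionaries containing the count of tenses for each sentence
--     '''
--     tense_counts = []
--     for text in tagged_texts:
--         tense = {}
--         tense["future"] = len(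
--             [word for word in text if word[1] in ["VBC", "VBF", "MD"]])
--         tense["present"] = len(
--             [word for word in text if word[1] in ["VBP", "VBZ", "VBG"]])
--         tense["past"] = len(
--             [word for word in text if word[1] in ["VBD", "VBN"]])
--         tense_counts.append(tense)
--
--     return tense_counts
-- ===== SOURCE B (Python) =====
-- _TAG2TENSE = {"VBC": "future", "VBF": "future", "MD": "future",
--               "VBP": "present", "VBZ": "present", "VBG": "present",
--               "VBD": "past", "VBN": "past"}
--
-- def get_verb_tense(tagged_texts):
--     tense_counts = []
--     for text in tagged_texts:
--         fut = pres = past = 0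
--         for word in text:
--             cat = _TAG2TENSE.get(word[1])
--             if cat == "future":
--                 fut += 1
--             elif cat == "present":
--                 pres += 1
--             elif cat == "past":
--                 past += 1
--         tense_counts.append({"future": fut, "present": pres, "past": past})
--     return tense_counts
-- ===== Notes on version B (the rewrite author's own statement) =====
-- stated objective: simpler
-- what changed: Replaces three separate membership-filtered scans per sentence (building intermediate lists and taking their lengths) with a single table-driven pass that maps each tag to its tense via a dict and increments one of three counters.
import Mathlib
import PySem

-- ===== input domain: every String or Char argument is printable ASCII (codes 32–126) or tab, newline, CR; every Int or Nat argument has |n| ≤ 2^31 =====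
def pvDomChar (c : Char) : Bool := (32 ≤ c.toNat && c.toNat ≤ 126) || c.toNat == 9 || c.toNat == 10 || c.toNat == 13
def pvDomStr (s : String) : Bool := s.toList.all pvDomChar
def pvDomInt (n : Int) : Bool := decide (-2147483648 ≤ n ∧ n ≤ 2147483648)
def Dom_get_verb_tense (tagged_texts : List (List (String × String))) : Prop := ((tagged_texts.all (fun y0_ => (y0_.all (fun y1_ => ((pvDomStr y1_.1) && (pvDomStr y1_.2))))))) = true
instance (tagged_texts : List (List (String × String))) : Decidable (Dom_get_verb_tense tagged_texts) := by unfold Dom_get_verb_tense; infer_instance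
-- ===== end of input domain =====

-- B replaces A's three membership-filtered scans per sentence with one table-driven
-- pass keeping three counters (objective: simpler). Equivalence of return values is proved.

-- ===== PORT A =====
-- three filtered scans per sentence, lengths taken, dict built key by key
def get_verb_tense (tagged_texts : List (List (String × String))) : List (List (String × Int)) :=
  tagged_texts.foldl (fun tense_counts text =>
    let tense : List (String × Int) :=
      [("future", ((text.filter (fun word => ["VBC", "VBF", "MD"].contains word.2)).length : Int)),
       ("present", ((text.filter (fun word => ["VBP", "VBZ", "VBG"].contains word.2)).length : Int)),
       ("past", ((text.filter (fun word => ["VBD", "VBN"].contains word.2)).length : Int))]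
    tense_counts ++ [tense]) []

-- ===== PORT B =====
-- _TAG2TENSE.get on the literal module-level dict, ported as a lookup function
def tag2tense (tag : String) : Option String :=
  if tag = "VBC" then some "future"
  else if tag = "VBF" then some "future"
  else if tag = "MD" then some "future"
  else if tag = "VBP" then some "present"
  else if tag = "VBZ" then some "present"
  else if tag = "VBG" then some "present"
  else if tag = "VBD" then some "past"
  else if tag = "VBN" then some "past"
  else none

-- single pass per sentence over three counters (fut, pres, past)
def get_verb_tense_alt (tagged_texts : List (List (String × String))) : List (List (String × Int)) :=
  tagged_texts.foldl (fun tense_counts text =>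
    let c : Int × Int × Int :=
      text.foldl (fun c word =>
        let cat := tag2tense word.2
        if cat = some "future" then (c.1 + 1, c.2.1, c.2.2)
        else if cat = some "present" then (c.1, c.2.1 + 1, c.2.2)
        else if cat = some "past" then (c.1, c.2.1, c.2.2 + 1)
        else c) (0, 0, 0)
    tense_counts ++ [[("future", c.1), ("present", c.2.1), ("past", c.2.2)]]) []

-- ===== PRECONDITION & SPEC =====
def Spec_get_verb_tense (tagged_texts : List (List (String × String))) (out : List (List (String × Int))) : Prop := out = get_verb_tense_alt tagged_texts
instance (tagged_texts : List (List (String × String))) (out : List (List (String × Int))) : Decidable (Spec_get_verb_tense tagged_texts out) := by unfold Spec_get_verb_tense; infer_instance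

-- ===== CLAIM (what is proved, stated in full; the proofs are below) =====
def Claim_equal_get_verb_tense : Prop := ∀ (tagged_texts : List (List (String × String))), Dom_get_verb_tense tagged_texts → Spec_get_verb_tense tagged_texts (get_verb_tense tagged_texts)

-- ===== LEMMAS AND PROOFS =====

theorem contains_fut (t : String) : (["VBC", "VBF", "MD"].contains t = true) ↔ tag2tense t = some "future" := by
  unfold tag2tense; split_ifs <;> simp_all

theorem contains_pres (t : String) : (["VBP", "VBZ", "VBG"].contains t = true) ↔ tag2tense t = some "present" := by
  unfold tag2tense; split_ifs <;> simp_all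

theorem contains_past (t : String) : (["VBD", "VBN"].contains t = true) ↔ tag2tense t = some "past" := by
  unfold tag2tense; split_ifs <;> simp_all

theorem tag2tense_cases (t : String) :
    tag2tense t = none ∨ tag2tense t = some "future" ∨ tag2tense t = some "present" ∨ tag2tense t = some "past" := by
  unfold tag2tense; split_ifs <;> simp

-- the inner loop of B computes the three filter-lengths of A, shifted by the accumulator
theorem inner_loop_eq (text : List (String × String)) :
    ∀ (f p q : Int),
      text.foldl (fun c (word : String × String) =>
        let cat := tag2tense word.2
        if cat = some "future" then (c.1 + 1, c.2.1, c.2.2)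
        else if cat = some "present" then (c.1, c.2.1 + 1, c.2.2)
        else if cat = some "past" then (c.1, c.2.1, c.2.2 + 1)
        else c) (f, p, q)
      = (f + ((text.filter (fun word => ["VBC", "VBF", "MD"].contains word.2)).length : Int),
         p + ((text.filter (fun word => ["VBP", "VBZ", "VBG"].contains word.2)).length : Int),
         q + ((text.filter (fun word => ["VBD", "VBN"].contains word.2)).length : Int)) := by
  induction text with
  | nil => intro f p q; simp
  | cons w rest ih =>
    intro f p q
    rcases tag2tense_cases w.2 with h | h | h | h <;>
      simp only [List.foldl_cons, List.filter_cons, contains_fut, contains_pres, contains_past, h] <;>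
      simp [ih] <;> ring

-- ===== VERDICT (by name: the statement is the Claim_ definition above) =====
theorem get_verb_tense_spec : Claim_equal_get_verb_tense := by
  intro tagged_texts hD
  clear hD
  unfold Spec_get_verb_tense get_verb_tense get_verb_tense_alt
  induction tagged_texts using List.reverseRecOn with
  | nil => rfl
  | append_singleton ts t ih =>
    rw [List.foldl_append, List.foldl_append, List.foldl_cons, List.foldl_cons, List.foldl_nil, List.foldl_nil, ih]
    simp [inner_loop_eq]
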